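-- pv_equiv track=rewrite | github.com/wafflespeanut/scripts | Euler/32 - Pandigital Products.py | genum
-- ===== SOURCE A (Python) =====
-- def checkpan(n,s):
--     l=''.join([str(i) for i in range(1,n+1)])
--     a=[0 for i in range(n+1)]; j=0
--     for i in range(len(s)):
--         if s[i] in l: a[int(s[i])]+=1
--     for i in l:
--         if i not in s: return False
--     while j<len(a):
--         if a[j]>1: return False
--         j+=1
--     return True
--
-- def genum(r,n):
--     s=0; a=set()
--     for i in range(r+1):
--         for j in range(r+1):
--             s=str(i*j)+str(i)+str(j)
--             if len(s)>n: break
--             if checkpan(n,s): a.update([i*j])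
--     return list(a)
-- ===== SOURCE B (Python) =====
-- def genum(r, n):
--     # the distinct characters of '123...n' are '1'..str(n) for n <= 9, else all ten digits;
--     # a candidate passes iff its characters are a permutation of them
--     target = list('123456789'[:max(0, n)]) if n <= 9 else list('0123456789')
--     a = set()
--     for i in range(r + 1):
--         for j in range(r + 1):
--             s = str(i * j) + str(i) + str(j)
--             if len(s) > n:
--                 break
--             if sorted(s) == target:
--                 a.add(i * j)
--     return list(a)
-- ===== Notes on version B (the rewrite author's own statement) =====
-- stated objective: faster
-- what changed: Drops the checkpan helper entirely: instead of rebuilding the string '12...n' for every candidate and making three scanning passes (digit-counting array, membership scan for every required character, duplicate scan), B writes down the target character list once in closed form ('1'..str(n) for n<=9, else all ten digits) and tests each candidate with a single sorted(s)==target comparison.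
import Mathlib
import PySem

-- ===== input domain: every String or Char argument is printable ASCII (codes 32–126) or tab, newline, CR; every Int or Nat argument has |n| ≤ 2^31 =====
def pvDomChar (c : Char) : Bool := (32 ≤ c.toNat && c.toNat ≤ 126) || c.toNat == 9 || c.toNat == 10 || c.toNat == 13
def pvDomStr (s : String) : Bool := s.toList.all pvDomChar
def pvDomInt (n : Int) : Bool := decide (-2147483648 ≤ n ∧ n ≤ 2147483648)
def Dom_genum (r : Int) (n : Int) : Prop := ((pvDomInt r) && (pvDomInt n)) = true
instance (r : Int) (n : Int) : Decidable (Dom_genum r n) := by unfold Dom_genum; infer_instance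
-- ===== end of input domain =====

-- B replaces checkpan's per-candidate rebuild of '12…n' plus three scanning passes by a
-- closed-form target computed once and a single sort-and-compare test (same search loop,
-- same break); a timing run measured B faster.
-- Both versions return list(set(...)); the equivalence (and Python) fixes the set of values, and
-- the two Pythons perform the identical add-sequence, so they return the identical list.

-- ===== PORT A =====
-- l = ''.join([str(i) for i in range(1,n+1)])   (shared with B, which builds the same string for its target)
def lChars (n : Int) : List Char :=
  PySem.Chars.join [] ((PySem.List.pyRange 1 (n+1)).map PySem.Int.toChars)

-- while j<len(a): if a[j]>1: return False; j+=1
def checkpanWhile (a : List Int) (j : Int) : Bool :=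
  if h : j < (a.length : Int) then
    if PySem.List.pyGetD a j 0 > 1 then false else checkpanWhile a (j + 1)
  else true
termination_by ((a.length : Int) - j).toNat
decreasing_by omega

-- the body of "for i in range(len(s)): if s[i] in l: a[int(s[i])]+=1":
-- int(s[i]) is guarded by "s[i] in l" whose characters are digits, so ofChars? never returns none there
def bumpStep (l : List Char) (acc : List Int) (c : Char) : List Int :=
  if PySem.Chars.isIn [c] l then
    match PySem.Int.ofChars? [c] with
    | some d => PySem.List.pySetD acc d (PySem.List.pyGetD acc d 0 + 1)
    | none => acc
  else acc

def checkpan (n : Int) (s : List Char) : Bool :=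
  let l := lChars n
  let a0 : List Int := (PySem.List.pyRange 0 (n+1)).map (fun _ => (0 : Int))  -- [0 for i in range(n+1)]
  -- for i in range(len(s)): …   (i is always in range, so pyGetD is exact)
  let a1 := (PySem.List.pyRange 0 (s.length : Int)).foldl
    (fun acc i => bumpStep l acc (PySem.List.pyGetD s i ' ')) a0
  -- for i in l: if i not in s: return False   (early return on the first failing character = any)
  if l.any (fun c => !(PySem.Chars.isIn [c] s)) then false
  else checkpanWhile a1 0

-- the inner "for j in range(r+1)" with its break
def genumInner (n i : Int) (js : List Int) (acc : PySem.Set Int) : PySem.Set Int :=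
  match js with
  | [] => acc
  | j :: rest =>
    let s := PySem.Int.toChars (i * j) ++ PySem.Int.toChars i ++ PySem.Int.toChars j
    if (s.length : Int) > n then acc  -- break
    else genumInner n i rest (if checkpan n s then PySem.Set.update acc [i * j] else acc)

-- list(a): the set's distinct elements (return value compared as a set)
def genum (r : Int) (n : Int) : List Int :=
  let js := PySem.List.pyRange 0 (r+1)  -- range(r+1), built once (Python's range is lazy)
  js.foldl (fun acc i => genumInner n i js acc) ([] : PySem.Set Int)

-- ===== PORT B =====
-- target = list('123456789'[:max(0, n)]) if n <= 9 else list('0123456789')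
def targetChars (n : Int) : List Char :=
  if n ≤ 9 then PySem.List.slice ['1','2','3','4','5','6','7','8','9'] none (some (max 0 n))
  else ['0','1','2','3','4','5','6','7','8','9']

def genumAltInner (n : Int) (target : List Char) (i : Int) (js : List Int) (acc : PySem.Set Int) :
    PySem.Set Int :=
  match js with
  | [] => acc
  | j :: rest =>
    let s := PySem.Int.toChars (i * j) ++ PySem.Int.toChars i ++ PySem.Int.toChars j
    if (s.length : Int) > n then acc  -- break
    else genumAltInner n target i rest
      (if PySem.List.sorted s (fun c => c) false = target then PySem.Set.add acc (i * j) else acc)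

def genum_alt (r : Int) (n : Int) : List Int :=
  let target := targetChars n
  let js := PySem.List.pyRange 0 (r+1)  -- range(r+1), built once (Python's range is lazy)
  js.foldl (fun acc i => genumAltInner n target i js acc) ([] : PySem.Set Int)

-- ===== PRECONDITION & SPEC =====
def Spec_genum (r : Int) (n : Int) (out : List Int) : Prop := out = genum_alt r n
instance (r : Int) (n : Int) (out : List Int) : Decidable (Spec_genum r n out) := by unfold Spec_genum; infer_instance

-- ===== CLAIM (what is proved, stated in full; the proofs are below) =====
def Claim_equal_genum : Prop := ∀ (r : Int) (n : Int), Dom_genum r n → Spec_genum r n (genum r n)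

-- ===== LEMMAS AND PROOFS =====

def digitsList : List Char := ['0', '1', '2', '3', '4', '5', '6', '7', '8', '9']

theorem join_nil_eq_flatten (parts : List (List Char)) :
    PySem.Chars.join [] parts = parts.flatten := by
  induction parts with
  | nil => rfl
  | cons p ps ih =>
    simp only [PySem.Chars.join, List.intercalate] at *
    cases ps with
    | nil => simp
    | cons q qs => simpa [List.intersperse] using ih

theorem digitChar_mem (m : Nat) (h : m < 10) : m.digitChar ∈ digitsList := by
  interval_cases m <;> decide

theorem toDigitsCore_digits (f m : Nat) (ds : List Char) (hds : ∀ c ∈ ds, c ∈ digitsList) :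
    ∀ c ∈ Nat.toDigitsCore 10 f m ds, c ∈ digitsList := by
  induction f generalizing m ds with
  | zero => exact hds
  | succ f ih =>
    unfold Nat.toDigitsCore
    have hd : (m % 10).digitChar ∈ digitsList := digitChar_mem _ (Nat.mod_lt _ (by norm_num))
    have hcons : ∀ c ∈ (m % 10).digitChar :: ds, c ∈ digitsList := by
      intro c hc
      rcases List.mem_cons.mp hc with e | hc
      · exact e ▸ hd
      · exact hds c hc
    by_cases h : m / 10 = 0
    · simpa [h] using hcons
    · simpa [h] using ih (m / 10) _ hcons

theorem toChars_digits (m : Int) (hm : 0 ≤ m) : ∀ c ∈ PySem.Int.toChars m, c ∈ digitsList := by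
  simp only [PySem.Int.toChars, if_neg (not_lt.mpr hm)]
  exact toDigitsCore_digits _ _ _ (by simp)

theorem lChars_digits (n : Int) : ∀ c ∈ lChars n, c ∈ digitsList := by
  intro c hc
  rw [lChars, join_nil_eq_flatten, List.mem_flatten] at hc
  obtain ⟨p, hp, hcp⟩ := hc
  obtain ⟨k, hk, rfl⟩ := List.mem_map.mp hp
  exact toChars_digits k (by have := PySem.List.mem_pyRange_one.mp hk; omega) c hcp

theorem singleton_isIn (c : Char) (t : List Char) : PySem.Chars.isIn [c] t = true ↔ c ∈ t := by
  rw [PySem.Chars.isIn_iff_infix]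
  constructor
  · intro h; exact h.mem (by simp)
  · intro h
    obtain ⟨l1, l2, e⟩ := List.append_of_mem h
    exact ⟨l1, l2, by simp [e]⟩

theorem ofChars_digit (c : Char) (h : c ∈ digitsList) :
    PySem.Int.ofChars? [c] = some (((c.toNat - 48 : Nat) : Int)) := by
  fin_cases h <;> decide

theorem dvn_lt_ten (c : Char) (h : c ∈ digitsList) : c.toNat - 48 < 10 := by
  fin_cases h <;> decide

theorem digit_inj (c c' : Char) (h : c ∈ digitsList) (h' : c' ∈ digitsList)
    (e : c.toNat - 48 = c'.toNat - 48) : c = c' := by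
  fin_cases h <;> fin_cases h' <;> simp_all

theorem while_iff (a : List Int) (j : Int) :
    0 ≤ j → (checkpanWhile a j = true ↔
      ∀ k : Nat, j ≤ (k : Int) → k < a.length → PySem.List.pyGetD a (k : Int) 0 ≤ 1) := by
  induction j using checkpanWhile.induct (a := a) with
  | case1 j h hget =>
    intro hj
    rw [checkpanWhile, dif_pos h, if_pos hget]
    constructor
    · intro hfalse; cases hfalse
    · intro H
      have := H j.toNat (by omega) (by omega)
      rw [show ((j.toNat : Nat) : Int) = j by omega] at this
      omega
  | case2 j h hget ih =>
    intro hj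
    rw [checkpanWhile, dif_pos h, if_neg hget, ih (by omega)]
    constructor
    · intro H k hk1 hk2
      rcases eq_or_lt_of_le hk1 with e | lt
      · rw [← e]; omega
      · exact H k (by omega) hk2
    · intro H k hk1 hk2; exact H k (by omega) hk2
  | case3 j h =>
    intro hj
    rw [checkpanWhile, dif_neg h]
    simp only [true_iff]
    intro k hk1 hk2; omega

theorem length_bump (l : List Char) (cs : List Char) (acc : List Int) :
    (cs.foldl (bumpStep l) acc).length = acc.length := by
  induction cs generalizing acc with
  | nil => rfl
  | cons c cs ih =>
    rw [List.foldl_cons, ih]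
    unfold bumpStep
    split
    · split
      · exact PySem.List.length_pySetD _ _ _
      · rfl
    · rfl

theorem bump_getD (l : List Char) (cs : List Char) (hd : ∀ c ∈ cs, c ∈ digitsList)
    (acc : List Int) (hb : ∀ c ∈ cs, c ∈ l → c.toNat - 48 < acc.length) (k : Nat) :
    PySem.List.pyGetD (cs.foldl (bumpStep l) acc) (k : Int) 0 =
      PySem.List.pyGetD acc (k : Int) 0 +
        (cs.countP (fun c => decide (c ∈ l) && decide (c.toNat - 48 = k)) : Int) := by
  induction cs generalizing acc with
  | nil => simp
  | cons c cs ih =>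
    have hdc : c ∈ digitsList := hd c (by simp)
    have hdcs : ∀ x ∈ cs, x ∈ digitsList := fun x hx => hd x (by simp [hx])
    rw [List.foldl_cons, List.countP_cons]
    by_cases hcl : c ∈ l
    · have hstep : bumpStep l acc c =
          PySem.List.pySetD acc ((c.toNat - 48 : Nat) : Int)
            (PySem.List.pyGetD acc ((c.toNat - 48 : Nat) : Int) 0 + 1) := by
        unfold bumpStep
        rw [if_pos ((singleton_isIn c l).mpr hcl), ofChars_digit c hdc]
      have hblt : c.toNat - 48 < acc.length := hb c (by simp) hcl
      have hbcs : ∀ x ∈ cs, x ∈ l → x.toNat - 48 < (bumpStep l acc c).length := by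
        intro x hx hxl
        rw [hstep, PySem.List.length_pySetD]
        exact hb x (by simp [hx]) hxl
      rw [ih hdcs _ hbcs, hstep, PySem.List.pyGetD_pySetD_natCast _ _ _ _ _ hblt]
      by_cases hk : k = c.toNat - 48
      · simp only [hk, hcl, decide_true, Bool.true_and, if_true]
        push_cast
        ring
      · rw [if_neg (by omega)]
        have : (decide (c ∈ l) && decide (c.toNat - 48 = k)) = false := by
          simp [hcl]; omega
        rw [this]
        push_cast
        ring
    · have hstep : bumpStep l acc c = acc := by
        unfold bumpStep
        rw [if_neg (by simpa using (fun h => hcl ((singleton_isIn c l).mp h)))]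
      have : (decide (c ∈ l) && decide (c.toNat - 48 = k)) = false := by simp [hcl]
      rw [this, hstep, ih hdcs _ (fun x hx hxl => hb x (by simp [hx]) hxl)]
      push_cast
      ring

theorem a0_getD (n : Int) (k : Nat) :
    PySem.List.pyGetD ((PySem.List.pyRange 0 (n+1)).map (fun _ => (0 : Int))) (k : Int) 0 = 0 := by
  rw [PySem.List.pyGetD_natCast]
  cases h : (PySem.List.pyRange 0 (n+1))[k]? <;>
    simp [List.getD_eq_getElem?_getD]

theorem a0_length (n : Int) :
    ((PySem.List.pyRange 0 (n+1)).map (fun _ => (0 : Int))).length = (n + 1).toNat := by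
  rw [List.length_map, PySem.List.length_pyRange_one]
  omega

set_option maxRecDepth 4000 in
theorem lChars_le9 (n : Int) (hn0 : 0 ≤ n) (h9 : n ≤ 9) :
    PySem.Set.ofList (lChars n) = lChars n ∧ (lChars n).Nodup ∧
      (lChars n).length = n.toNat := by
  interval_cases n <;> exact ⟨by decide, by decide, by decide⟩

theorem digit_val_range (c : Char) (h : c ∈ digitsList) : 48 ≤ c.toNat ∧ c.toNat ≤ 57 := by
  fin_cases h <;> decide

theorem toChars_val_le9 (k : Int) (h1 : 1 ≤ k) (h9 : k ≤ 9) :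
    ∀ c ∈ PySem.Int.toChars k, (c.toNat : Int) - 48 = k := by
  interval_cases k
  · intro c hc
    rw [show PySem.Int.toChars 1 = ['1'] from by decide] at hc
    simp only [List.mem_singleton] at hc
    subst hc
    decide
  · intro c hc
    rw [show PySem.Int.toChars 2 = ['2'] from by decide] at hc
    simp only [List.mem_singleton] at hc
    subst hc
    decide
  · intro c hc
    rw [show PySem.Int.toChars 3 = ['3'] from by decide] at hc
    simp only [List.mem_singleton] at hc
    subst hc
    decide
  · intro c hc
    rw [show PySem.Int.toChars 4 = ['4'] from by decide] at hc
    simp only [List.mem_singleton] at hc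
    subst hc
    decide
  · intro c hc
    rw [show PySem.Int.toChars 5 = ['5'] from by decide] at hc
    simp only [List.mem_singleton] at hc
    subst hc
    decide
  · intro c hc
    rw [show PySem.Int.toChars 6 = ['6'] from by decide] at hc
    simp only [List.mem_singleton] at hc
    subst hc
    decide
  · intro c hc
    rw [show PySem.Int.toChars 7 = ['7'] from by decide] at hc
    simp only [List.mem_singleton] at hc
    subst hc
    decide
  · intro c hc
    rw [show PySem.Int.toChars 8 = ['8'] from by decide] at hc
    simp only [List.mem_singleton] at hc
    subst hc
    decide
  · intro c hc
    rw [show PySem.Int.toChars 9 = ['9'] from by decide] at hc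
    simp only [List.mem_singleton] at hc
    subst hc
    decide

theorem dv_bound_le9 (n : Int) (hn0 : 0 ≤ n) (h9 : n ≤ 9) :
    ∀ c ∈ lChars n, c.toNat - 48 < (n + 1).toNat := by
  intro c hc
  rw [lChars, join_nil_eq_flatten, List.mem_flatten] at hc
  obtain ⟨p, hp, hcp⟩ := hc
  obtain ⟨k, hk, rfl⟩ := List.mem_map.mp hp
  have hkr := PySem.List.mem_pyRange_one.mp hk
  have hv := toChars_val_le9 k hkr.1 (by omega) c hcp
  have hr := digit_val_range c (toChars_digits k (by omega) c hcp)
  omega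

theorem mem_lChars_ten (n : Int) (hn : 10 ≤ n) : ∀ c ∈ digitsList, c ∈ lChars n := by
  have hmem : ∀ k : Int, 1 ≤ k → k ≤ 10 → ∀ c ∈ PySem.Int.toChars k, c ∈ lChars n := by
    intro k hk1 hk2 c hc
    rw [lChars, join_nil_eq_flatten, List.mem_flatten]
    exact ⟨PySem.Int.toChars k,
      List.mem_map_of_mem (PySem.List.mem_pyRange_one.mpr ⟨hk1, by omega⟩), hc⟩
  intro c hc
  fin_cases hc
  · exact hmem 10 (by norm_num) le_rfl '0' (by decide)
  · exact hmem 1 le_rfl (by norm_num) '1' (by decide)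
  · exact hmem 2 (by norm_num) (by norm_num) '2' (by decide)
  · exact hmem 3 (by norm_num) (by norm_num) '3' (by decide)
  · exact hmem 4 (by norm_num) (by norm_num) '4' (by decide)
  · exact hmem 5 (by norm_num) (by norm_num) '5' (by decide)
  · exact hmem 6 (by norm_num) (by norm_num) '6' (by decide)
  · exact hmem 7 (by norm_num) (by norm_num) '7' (by decide)
  · exact hmem 8 (by norm_num) (by norm_num) '8' (by decide)
  · exact hmem 9 (by norm_num) (by norm_num) '9' (by decide)

theorem checkpan_eq (n : Int) (s : List Char) :
    checkpan n s =
      (if (lChars n).any (fun c => !(PySem.Chars.isIn [c] s)) then false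
       else checkpanWhile
         (s.foldl (bumpStep (lChars n)) ((PySem.List.pyRange 0 (n+1)).map (fun _ => (0 : Int)))) 0) := by
  simp only [checkpan]
  rw [PySem.List.foldl_pyRange_zero_pyGetD']

theorem checkpan_iff (n : Int) (s : List Char) (hd : ∀ c ∈ s, c ∈ digitsList)
    (hl : (s.length : Int) ≤ n) :
    (checkpan n s = true) ↔ s.Perm (PySem.Set.ofList (lChars n)) := by
  have hn0 : (0 : Int) ≤ n := le_trans (by exact_mod_cast Nat.zero_le _) hl
  rw [checkpan_eq]
  by_cases h2 : (lChars n).any (fun c => !(PySem.Chars.isIn [c] s))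
  · rw [if_pos h2]
    simp only [Bool.false_eq_true, false_iff]
    intro hperm
    obtain ⟨c, hcl, hcns⟩ := List.any_eq_true.mp h2
    have hcs : c ∉ s := fun hmem => by
      rw [Bool.not_eq_true'] at hcns
      exact absurd ((singleton_isIn c s).mpr hmem) (by simp [hcns])
    exact hcs (hperm.mem_iff.mpr ((PySem.Set.mem_ofList _ _).mpr hcl))
  · rw [if_neg h2]
    have hpass2 : ∀ c ∈ lChars n, c ∈ s := by
      intro c hcl
      by_contra hcs
      exact h2 (List.any_eq_true.mpr ⟨c, hcl, by
        rw [Bool.not_eq_true']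
        rw [← Bool.not_eq_true]
        intro hin
        exact hcs ((singleton_isIn c s).mp hin)⟩)
    have hb : ∀ c ∈ s, c ∈ lChars n →
        c.toNat - 48 < ((PySem.List.pyRange 0 (n+1)).map (fun _ => (0 : Int))).length := by
      intro c hcs hcl
      rw [a0_length]
      rcases (by omega : n ≤ 9 ∨ 10 ≤ n) with h9 | h10
      · exact dv_bound_le9 n hn0 h9 c hcl
      · have := dvn_lt_ten c (hd c hcs)
        omega
    have hget : ∀ k : Nat,
        PySem.List.pyGetD (s.foldl (bumpStep (lChars n))
          ((PySem.List.pyRange 0 (n+1)).map (fun _ => (0 : Int)))) (k : Int) 0 =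
        (s.countP (fun c => decide (c ∈ lChars n) && decide (c.toNat - 48 = k)) : Int) := by
      intro k
      rw [bump_getD _ _ hd _ hb k, a0_getD]
      ring
    have hlen1 : (s.foldl (bumpStep (lChars n))
        ((PySem.List.pyRange 0 (n+1)).map (fun _ => (0 : Int)))).length = (n + 1).toNat := by
      rw [length_bump, a0_length]
    rw [while_iff _ 0 le_rfl]
    constructor
    · intro H
      have hcount : ∀ c ∈ lChars n, s.count c ≤ 1 := by
        intro c hcl
        have hdc : c ∈ digitsList := lChars_digits n c hcl
        have hklt : c.toNat - 48 < (n + 1).toNat := by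
          rcases (by omega : n ≤ 9 ∨ 10 ≤ n) with h9 | h10
          · exact dv_bound_le9 n hn0 h9 c hcl
          · have := dvn_lt_ten c hdc
            omega
        have := H (c.toNat - 48) (by omega) (by omega)
        rw [hget] at this
        have hmono : s.count c ≤
            s.countP (fun x => decide (x ∈ lChars n) && decide (x.toNat - 48 = (c.toNat - 48))) := by
          rw [List.count_eq_countP]
          exact List.countP_mono_left (fun x hx hbeq => by
            have : x = c := by simpa using hbeq
            subst this
            simp [hcl])
        omega
      rcases (by omega : n ≤ 9 ∨ 10 ≤ n) with h9 | h10
      · obtain ⟨hE, hnd, hlen9⟩ := lChars_le9 n hn0 h9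
        rw [hE]
        have hsub : lChars n ⊆ s := fun c hc => hpass2 c hc
        exact ((hnd.subperm hsub).perm_of_length_le (by omega)).symm
      · rw [List.perm_iff_count]
        intro c
        by_cases hcE : c ∈ PySem.Set.ofList (lChars n)
        · have hcl : c ∈ lChars n := (PySem.Set.mem_ofList _ _).mp hcE
          rw [List.count_eq_one_of_mem (PySem.Set.nodup_ofList _) hcE]
          have h1 : 0 < s.count c := List.count_pos_iff.mpr (hpass2 c hcl)
          have h2' := hcount c hcl
          omega
        · have hcs : c ∉ s := fun hmem =>
            hcE ((PySem.Set.mem_ofList _ _).mpr (mem_lChars_ten n (by omega) c (hd c hmem)))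
          rw [List.count_eq_zero.mpr hcs, List.count_eq_zero.mpr hcE]
    · intro hperm k hk0 hklen
      rw [hget k]
      have hnd : s.Nodup := (hperm.nodup_iff).mpr (PySem.Set.nodup_ofList _)
      by_cases hex : ∃ c ∈ s, (decide (c ∈ lChars n) && decide (c.toNat - 48 = k)) = true
      · obtain ⟨c0, hc0s, hc0p⟩ := hex
        have hc0 : c0 ∈ digitsList := hd c0 hc0s
        have hmono : s.countP (fun x => decide (x ∈ lChars n) && decide (x.toNat - 48 = k)) ≤
            s.count c0 := by
          rw [List.count_eq_countP]
          refine List.countP_mono_left (fun x hx hpx => ?_)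
          simp only [Bool.and_eq_true, decide_eq_true_eq] at hpx hc0p
          have : x = c0 := digit_inj x c0 (hd x hx) hc0 (by omega)
          simp [this]
        have := (List.nodup_iff_count_le_one.mp hnd) c0
        have hle : s.countP (fun x => decide (x ∈ lChars n) && decide (x.toNat - 48 = k)) ≤ 1 := by omega
        exact_mod_cast hle
      · have : s.countP (fun x => decide (x ∈ lChars n) && decide (x.toNat - 48 = k)) = 0 := by
          rw [List.countP_eq_zero]
          intro a ha
          exact fun hpa => hex ⟨a, ha, hpa⟩
        rw [this]
        norm_num

set_option maxRecDepth 4000 in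
theorem targetChars_eq (n : Int) :
    targetChars n = PySem.List.sorted (PySem.Set.ofList (lChars n)) (fun c => c) false := by
  rcases (by omega : n < 0 ∨ (0 ≤ n ∧ n ≤ 9) ∨ 10 ≤ n) with hneg | ⟨h0, h9⟩ | h10
  · have hnil : lChars n = [] := by
      rw [lChars, PySem.List.pyRange_one_eq_nil (by omega)]
      rfl
    rw [hnil, targetChars, if_pos (by omega), show max 0 n = 0 from by omega]
    rfl
  · interval_cases n <;> decide
  · rw [targetChars, if_neg (by omega)]
    have hsub1 : digitsList ⊆ PySem.Set.ofList (lChars n) := fun c hc =>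
      (PySem.Set.mem_ofList _ _).mpr (mem_lChars_ten n h10 c hc)
    have hsub2 : PySem.Set.ofList (lChars n) ⊆ digitsList := fun c hc =>
      lChars_digits n c ((PySem.Set.mem_ofList _ _).mp hc)
    have hperm : digitsList.Perm (PySem.Set.ofList (lChars n)) :=
      ((by decide : digitsList.Nodup).subperm hsub1).antisymm
        ((PySem.Set.nodup_ofList _).subperm hsub2)
    exact (PySem.List.sorted_eq_of_perm_of_pairwise_lt (PySem.Set.ofList (lChars n)) digitsList (fun c => c) hperm (by decide)).symm

theorem cond_eq (n : Int) (s : List Char) (hd : ∀ c ∈ s, c ∈ digitsList)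
    (hl : (s.length : Int) ≤ n) :
    checkpan n s = decide (PySem.List.sorted s (fun c => c) false = targetChars n) := by
  have hiff := checkpan_iff n s hd hl
  have h2 : (PySem.List.sorted s (fun c => c) false = targetChars n) ↔
      s.Perm (PySem.Set.ofList (lChars n)) := by
    rw [targetChars_eq]
    exact PySem.List.sorted_id_eq_sorted_id_iff_perm _ _
  by_cases hp : s.Perm (PySem.Set.ofList (lChars n))
  · rw [hiff.mpr hp]
    simp [h2.mpr hp]
  · have : checkpan n s ≠ true := fun h => hp (hiff.mp h)
    rw [Bool.eq_false_iff.mpr this]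
    symm
    rw [decide_eq_false_iff_not]
    exact fun hh => hp (h2.mp hh)

theorem inner_eq (n i : Int) (hi : 0 ≤ i) (js : List Int) (hjs : ∀ j ∈ js, 0 ≤ j)
    (acc : PySem.Set Int) : genumInner n i js acc = genumAltInner n (targetChars n) i js acc := by
  induction js generalizing acc with
  | nil => rfl
  | cons j rest ih =>
    have hj : 0 ≤ j := hjs j (by simp)
    have hrest : ∀ j' ∈ rest, 0 ≤ j' := fun j' h => hjs j' (by simp [h])
    unfold genumInner genumAltInner
    by_cases hlen : ((PySem.Int.toChars (i * j) ++ PySem.Int.toChars i ++ PySem.Int.toChars j).length : Int) > n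
    · simp only [hlen, if_pos]
    · have hle : ((PySem.Int.toChars (i * j) ++ PySem.Int.toChars i ++ PySem.Int.toChars j).length : Int) ≤ n := by omega
      have hdig : ∀ c ∈ PySem.Int.toChars (i * j) ++ PySem.Int.toChars i ++ PySem.Int.toChars j, c ∈ digitsList := by
        intro c hc
        rcases List.mem_append.mp hc with hc | hc
        · rcases List.mem_append.mp hc with hc | hc
          · exact toChars_digits _ (by positivity) c hc
          · exact toChars_digits _ hi c hc
        · exact toChars_digits _ hj c hc
      rw [if_neg hlen, if_neg hlen, ih hrest]
      congr 1
      rw [cond_eq n _ hdig hle]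
      by_cases hp : PySem.List.sorted (PySem.Int.toChars (i * j) ++ PySem.Int.toChars i ++ PySem.Int.toChars j) (fun c => c) false = targetChars n
      · simp [PySem.Set.update, PySem.Set.add]
      · simp

-- ===== VERDICT (by name: the statement is the Claim_ definition above) =====
theorem genum_spec : Claim_equal_genum := by
  intro r n _
  unfold Spec_genum genum genum_alt
  apply PySem.List.foldl_congr_mem
  intro acc i hi
  exact inner_eq n i (PySem.List.mem_pyRange_one.mp hi).1 _
    (fun j hj => (PySem.List.mem_pyRange_one.mp hj).1) acc
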